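-- pv_equiv track=rewrite | github.com/adnanahmadkhan/DSA | minimum_window_substring.py | getCurrentNumber
-- ===== SOURCE A (Python) =====
-- def getCurrentNumber(array):
--     if(len(array)==0):
--         return None
--     c = array[0]
--     if c is None:
--         for i in range(len(array)-1, 0, -1):
--             if array[i] is not None:
--                 return array[i]
--     return c
-- ===== SOURCE B (Python) =====
-- def getCurrentNumber(array):
--     if not array:
--         return None
--     if array[0] is not None:
--         return array[0]
--     vals = [x for x in array[1:] if x is not None]
--     return vals[-1] if vals else None
-- ===== Notes on version B (the rewrite author's own statement) =====
-- stated objective: alternative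
-- what changed: The backward index loop with early return is replaced by a forward filter of the tail followed by taking the last collected value; the first-element short-circuit and empty guard are kept.
import Mathlib
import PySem

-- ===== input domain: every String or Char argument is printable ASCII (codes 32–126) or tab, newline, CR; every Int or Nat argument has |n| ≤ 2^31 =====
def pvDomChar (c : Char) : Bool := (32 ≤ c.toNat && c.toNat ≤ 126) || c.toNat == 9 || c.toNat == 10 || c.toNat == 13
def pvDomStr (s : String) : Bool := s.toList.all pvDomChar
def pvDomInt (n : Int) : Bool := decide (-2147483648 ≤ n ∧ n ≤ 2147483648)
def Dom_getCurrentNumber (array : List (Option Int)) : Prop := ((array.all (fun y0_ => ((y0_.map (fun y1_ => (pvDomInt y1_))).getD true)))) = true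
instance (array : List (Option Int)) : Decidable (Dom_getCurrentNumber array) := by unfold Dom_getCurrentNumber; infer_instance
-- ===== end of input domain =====

-- B replaces A's backward index loop (early return) by a forward filter of the tail
-- followed by taking the last collected value; same guards, return value unchanged.

-- ===== PORT A =====
-- the for-loop over range(len(array)-1, 0, -1) with early return on a non-None element
def pvALoop (array : List (Option Int)) : List Int → Option Int
  | [] => none
  | i :: is =>
    match PySem.List.pyGetD array i none with
    | some v => some v
    | none => pvALoop array is

def getCurrentNumber (array : List (Option Int)) : Option Int :=
  if array.length == 0 then none
  else
    let c := PySem.List.pyGetD array 0 none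
    match c with
    | none =>
      match pvALoop array (PySem.List.pyRange ((array.length : Int) - 1) 0 (-1)) with
      | some v => some v
      | none => c
    | some _ => c

-- ===== PORT B =====
def getCurrentNumber_alt (array : List (Option Int)) : Option Int :=
  if array.length == 0 then none
  else
    match PySem.List.pyGetD array 0 none with
    | some v => some v
    | none =>
      let vals : List Int := (PySem.List.slice array (some 1) none).filterMap id
      vals.getLast?

-- ===== PRECONDITION & SPEC =====
def Spec_getCurrentNumber (array : List (Option Int)) (out : Option Int) : Prop := out = getCurrentNumber_alt array
instance (array : List (Option Int)) (out : Option Int) : Decidable (Spec_getCurrentNumber array out) := by unfold Spec_getCurrentNumber; infer_instance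

-- ===== CLAIM (what is proved, stated in full; the proofs are below) =====
def Claim_equal_getCurrentNumber : Prop := ∀ (array : List (Option Int)), Dom_getCurrentNumber array → Spec_getCurrentNumber array (getCurrentNumber array)

-- ===== LEMMAS AND PROOFS =====

-- A's backward scan from index k down to 1 finds the last non-None among array[1..k]
theorem pvALoop_spec (array : List (Option Int)) (k : Nat) (hk : k < array.length) :
    pvALoop array (PySem.List.pyRange (k : Int) 0 (-1))
      = (((array.drop 1).take k).filterMap id).getLast? := by
  induction k with
  | zero =>
    rw [PySem.List.pyRange_neg_one_eq_nil (by omega)]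
    simp [pvALoop]
  | succ k ih =>
    rw [PySem.List.pyRange_neg_one_cons (by omega : (0:Int) < ((k+1 : Nat) : Int))]
    have hidx : (k+1) < array.length := hk
    have hget : PySem.List.pyGetD array ((k+1 : Nat) : Int) none = array[k+1] := by
      rw [PySem.List.pyGetD_eq_getElem array none (by omega) (by exact_mod_cast hidx)]
      simp
    have htake : (array.drop 1).take (k+1)
        = (array.drop 1).take k ++ (array.drop 1)[k]?.toList := List.take_add_one
    have hgetd : (array.drop 1)[k]? = some array[k+1] := by
      rw [List.getElem?_drop]
      have : 1 + k = k + 1 := by omega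
      rw [this]
      exact List.getElem?_eq_getElem (by omega)
    show (match PySem.List.pyGetD array ((k+1 : Nat) : Int) none with
          | some v => some v
          | none => pvALoop array (PySem.List.pyRange (((k+1:Nat):Int) - 1) 0 (-1)))
        = (((array.drop 1).take (k+1)).filterMap id).getLast?
    have hstep : (((k+1:Nat):Int) - 1) = (k : Int) := by push_cast; ring
    rw [hget, htake, hgetd, hstep]
    cases hv : array[k+1] with
    | none =>
      simp only [Option.toList_some, List.filterMap_append, List.filterMap_cons,
        id, List.filterMap_nil, List.append_nil]
      exact ih (by omega)
    | some v =>
      simp [List.filterMap_append]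

-- ===== VERDICT (by name: the statement is the Claim_ definition above) =====
theorem getCurrentNumber_spec : Claim_equal_getCurrentNumber := by
  intro array _
  unfold Spec_getCurrentNumber getCurrentNumber getCurrentNumber_alt
  cases array with
  | nil => simp
  | cons c rest =>
    simp only [List.length_cons, PySem.List.pyGetD_zero_cons,
      PySem.List.slice_from_one, List.tail_cons, beq_iff_eq]
    cases c with
    | some v => simp
    | none =>
      have hlen : ((rest.length + 1 : Nat) : Int) - 1 = ((rest.length : Nat) : Int) := by
        push_cast; ring
      rw [if_neg (by omega), if_neg (by omega), hlen,
        pvALoop_spec (none :: rest) rest.length (by simp)]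
      simp only [List.drop_one, List.tail_cons, List.take_length]
      cases (rest.filterMap id).getLast? <;> simp
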